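-- pv_equiv track=rewrite | github.com/Aruna-1919/6Companies30Days | specialPerm.py | specialPerm
-- ===== SOURCE A (Python) =====
-- from typing import List
--
-- def specialPerm(nums: List[int]) -> int:
--     def findcount(prev, nums, visited, count):
--         if count == len(nums):
--             return 1
--
--         result = 0
--         for i in range(len(nums)):
--             if visited[i]:
--                 continue
--
--             if (prev != -1 and nums[prev] % nums[i] != 0 and nums[i] % nums[prev] != 0):
--                 continue
--
--             visited[i] = True
--             result = (result + findcount(i, nums, visited, count + 1)) % mod
--             visited[i] = False
--
--         return result
--
--     mod = pow(10, 9) + 7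
--     prev = -1
--     visited = [False] * len(nums)
--     return findcount(prev, nums, visited, 0)
-- ===== SOURCE B (Python) =====
-- from typing import List
--
-- def specialPerm(nums: List[int]) -> int:
--     # Bitmask DP over (subset, first element): dp rows are built for every mask
--     # in increasing order; dp[mask][i] = number of special orderings of the
--     # elements of mask that start at index i (mod 1e9+7).
--     MOD = 10 ** 9 + 7
--     n = len(nums)
--     if n == 0:
--         return 1
--     dp = [[0] * n]  # row for mask 0
--     for mask in range(1, 1 << n):
--         row = []
--         for i in range(n):
--             if not (mask >> i & 1):
--                 row.append(0)
--             elif mask == 1 << i: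
--                 row.append(1)
--             else:
--                 rest = mask ^ (1 << i)
--                 acc = 0
--                 for j in range(n):
--                     if rest >> j & 1 and (nums[i] % nums[j] == 0 or nums[j] % nums[i] == 0):
--                         acc = (acc + dp[rest][j]) % MOD
--                 row.append(acc)
--         dp.append(row)
--     return sum(dp[-1]) % MOD
-- ===== Notes on version B (the rewrite author's own statement) =====
-- stated objective: alternative
-- what changed: A's recursive backtracking over a visited array is replaced by a bottom-up bitmask dynamic program over (subset, first element) pairs, filling a 2^n-row table in increasing mask order; this is a genuinely different traversal of the same search space, with exponential-in-n cost on every input (so it can be slower than A's pruned search on typical random lists).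
import Mathlib
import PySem

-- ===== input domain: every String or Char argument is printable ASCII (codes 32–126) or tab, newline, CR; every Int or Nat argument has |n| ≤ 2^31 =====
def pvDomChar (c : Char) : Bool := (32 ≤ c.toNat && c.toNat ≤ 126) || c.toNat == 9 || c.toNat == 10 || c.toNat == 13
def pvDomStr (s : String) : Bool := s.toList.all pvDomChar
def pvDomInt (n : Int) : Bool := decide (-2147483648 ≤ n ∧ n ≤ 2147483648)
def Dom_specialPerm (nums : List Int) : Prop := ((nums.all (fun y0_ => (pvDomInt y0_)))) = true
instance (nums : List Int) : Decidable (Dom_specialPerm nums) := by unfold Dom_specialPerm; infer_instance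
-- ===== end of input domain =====

-- B is an alternative exact algorithm: a bottom-up bitmask DP over (subset, first
-- element) pairs instead of A's recursive backtracking over a visited array; only
-- equality of the returned values is claimed, nothing about speed.

-- ===== PORT A =====
-- termination lemma for the port's backtracking recursion (cited in decreasing_by)
theorem pvCountFalseSet {v : List Bool} {i : Nat} (h : v.getD i true = false) :
    (v.set i true).count false < v.count false := by
  induction v generalizing i with
  | nil => simp [List.getD] at h
  | cons b t ih =>
    cases i with
    | zero =>
      simp [List.getD] at h
      subst h
      simp
    | succ n =>
      have h' : t.getD n true = false := by simpa [List.getD] using h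
      have := ih h'
      cases b <;> simp [List.count_cons] <;> omega

-- A's nested 'def findcount' with its 'for i in range(len(nums))' loop; the loop is the
-- inner recursion fcLoop (Python's visited[i] is total here via getD: every reachable call
-- has len(visited) = len(nums) and 0 ≤ i < len(nums), so no IndexError is reachable; the
-- division-by-zero cases of '%' are excluded by Pre_specialPerm below).
mutual
def fcLoop (nums : List Int) (prev : Int) (visited : List Bool) (count : Int)
    (i : Nat) (result : Int) : Int :=
  if _h : i < nums.length then
    if hv : visited.getD i true then
      fcLoop nums prev visited count (i + 1) result
    else if prev ≠ -1 ∧ PySem.Int.mod (PySem.List.pyGetD nums prev 0) (nums.getD i 0) ≠ 0 ∧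
              PySem.Int.mod (nums.getD i 0) (PySem.List.pyGetD nums prev 0) ≠ 0 then
      fcLoop nums prev visited count (i + 1) result
    else
      fcLoop nums prev visited count (i + 1)
        (PySem.Int.mod (result + findcountA nums (i : Int) (visited.set i true) (count + 1)) 1000000007)
  else result
termination_by (visited.count false, nums.length + 1 - i)
decreasing_by
  · exact Prod.Lex.right _ (by omega)
  · exact Prod.Lex.right _ (by omega)
  · exact Prod.Lex.left _ _ (pvCountFalseSet (by simpa using hv))
  · exact Prod.Lex.right _ (by omega)

def findcountA (nums : List Int) (prev : Int) (visited : List Bool) (count : Int) : Int :=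
  if count = (nums.length : Int) then 1 else fcLoop nums prev visited count 0 0
termination_by (visited.count false, nums.length + 2)
decreasing_by exact Prod.Lex.right _ (by omega)
end

def specialPerm (nums : List Int) : Int :=
  findcountA nums (-1) (List.replicate nums.length false) 0

-- ===== PORT B =====
-- body of Source B's 'row.append(...)' cases for one (mask, i); masks are nonnegative ints,
-- ported as Nat (Python's 'mask >> i & 1', 'mask == 1 << i', 'mask ^ (1 << i)' are exact
-- on Nat); nums[i]/dp[rest] reads are in range by construction (getD).
def altEntry (nums : List Int) (dp : List (List Int)) (mask : Nat) (i : Nat) : Int :=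
  if ¬((mask >>> i) &&& 1 = 1) then 0
  else if mask = 1 <<< i then 1
  else
    (List.range nums.length).foldl (fun acc j =>
      if ((mask ^^^ (1 <<< i)) >>> j) &&& 1 = 1 ∧
         (PySem.Int.mod (nums.getD i 0) (nums.getD j 0) = 0 ∨
          PySem.Int.mod (nums.getD j 0) (nums.getD i 0) = 0)
      then PySem.Int.mod (acc + ((dp.getD (mask ^^^ (1 <<< i)) []).getD j 0)) 1000000007
      else acc) 0

def specialPerm_alt (nums : List Int) : Int :=
  let n := nums.length
  if n = 0 then 1
  else
    let dp : List (List Int) :=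
      (List.range' 1 (2 ^ n - 1)).foldl
        (fun dp mask =>
          dp ++ [(List.range n).foldl (fun row i => row ++ [altEntry nums dp mask i]) []])
        [List.replicate n 0]
    PySem.Int.mod (PySem.List.pyGetD dp (-1) []).sum 1000000007

-- ===== PRECONDITION & SPEC =====
-- Pre_ excludes exactly the inputs on which Python A raises ZeroDivisionError: any list
-- of two or more elements containing 0 (some 'nums[x] % 0' is always reached there;
-- zero-free lists and lists of fewer than two elements return normally and are admitted).
-- The equivalence proof itself never needs Pre_: both ports agree on every input.
def Pre_specialPerm (nums : List Int) : Prop := ¬((0 : Int) ∈ nums ∧ 2 ≤ nums.length)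
instance (nums : List Int) : Decidable (Pre_specialPerm nums) := by
  unfold Pre_specialPerm; infer_instance

def pvWitness_specialPerm : List Int := [2, 3, 6]

def Spec_specialPerm (nums : List Int) (out : Int) : Prop := out = specialPerm_alt nums
instance (nums : List Int) (out : Int) : Decidable (Spec_specialPerm nums out) := by
  unfold Spec_specialPerm; infer_instance

-- ===== CLAIM (what is proved, stated in full; the proofs are below) =====
def Claim_equal_specialPerm : Prop :=
  ∀ (nums : List Int), Dom_specialPerm nums → Pre_specialPerm nums →
    Spec_specialPerm nums (specialPerm nums)

-- ===== LEMMAS AND PROOFS =====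

theorem pvBit1_iff (m i : Nat) : ((m >>> i) &&& 1 = 1) ↔ m.testBit i := by
  simp [Nat.testBit, Nat.and_one_is_mod]

theorem pvXorPowLt {m i : Nat} (h : m.testBit i = true) : m ^^^ (1 <<< i) < m := by
  apply Nat.lt_of_testBit i
  · simp [Nat.testBit_xor, h, Nat.shiftLeft_eq, Nat.testBit_two_pow_self]
  · exact h
  · intro j hj
    simp [Nat.testBit_xor, Nat.shiftLeft_eq, Nat.testBit_two_pow_of_ne (Nat.ne_of_lt hj)]

def pvUnvis : List Bool → Nat
  | [] => 0
  | b :: t => (if b then 0 else 1) + 2 * pvUnvis t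

theorem pvUnvis_testBit (v : List Bool) (j : Nat) :
    (pvUnvis v).testBit j = (decide (j < v.length) && (v.getD j true == false)) := by
  induction v generalizing j with
  | nil => simp [pvUnvis]
  | cons b t ih =>
    cases j with
    | zero =>
      cases b <;> simp [pvUnvis, Nat.testBit_zero, List.getD] <;> omega
    | succ n =>
      have : ((if b then 0 else 1) + 2 * pvUnvis t) / 2 = pvUnvis t := by
        cases b <;> simp <;> omega
      simp [pvUnvis, Nat.testBit_succ, this, ih, List.getD]

theorem pvUnvis_zero_iff (v : List Bool) : pvUnvis v = 0 ↔ v.count false = 0 := by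
  induction v with
  | nil => simp [pvUnvis]
  | cons b t ih => cases b <;> simp [pvUnvis, List.count_cons, ih] <;> omega

theorem pvCountTrueFalse (v : List Bool) : v.count true + v.count false = v.length := by
  induction v with
  | nil => simp
  | cons b t ih => cases b <;> simp [List.count_cons] <;> omega

theorem pvGetD_lt {v : List Bool} {i : Nat} (hi : i < v.length) :
    v.getD i true = v[i] := by
  simp [List.getD_eq_getElem?_getD, List.getElem?_eq_getElem hi]

theorem pvGetD_ge {v : List Bool} {i : Nat} (hi : v.length ≤ i) :
    v.getD i true = true := by
  simp [List.getD_eq_getElem?_getD, List.getElem?_eq_none hi]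

theorem pvGetD_false {v : List Bool} {i : Nat} (h : v.getD i true = false) :
    i < v.length ∧ v[i]'(by by_cases hi : i < v.length; exact hi; rw [pvGetD_ge (by omega)] at h; exact absurd h (by simp)) = false := by
  by_cases hi : i < v.length
  · exact ⟨hi, by rw [pvGetD_lt hi] at h; exact h⟩
  · rw [pvGetD_ge (by omega)] at h; exact absurd h (by simp)

theorem pvGetDSet_ne {v : List Bool} {j k : Nat} (hk : k ≠ j) :
    (v.set j true).getD k true = v.getD k true := by
  by_cases hk2 : k < v.length
  · rw [pvGetD_lt (by simpa using hk2), pvGetD_lt hk2]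
    simp [List.getElem_set_ne (Ne.symm hk)]
  · rw [pvGetD_ge (by simp; omega), pvGetD_ge (by omega)]

theorem pvCountTrueSet {v : List Bool} {i : Nat} (h : v.getD i true = false) :
    (v.set i true).count true = v.count true + 1 := by
  obtain ⟨hi, hv⟩ := pvGetD_false h
  rw [List.count_set hi]
  simp [hv]

-- P4: setting an unvisited index visited and or-ing its bit back gives the same mask
theorem pvUnvisSetOr {v : List Bool} {j : Nat} (h : v.getD j true = false) :
    pvUnvis (v.set j true) ||| (1 <<< j) = pvUnvis v := by
  obtain ⟨hj, -⟩ := pvGetD_false h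
  apply Nat.eq_of_testBit_eq
  intro k
  rw [Nat.testBit_or, pvUnvis_testBit, pvUnvis_testBit, Nat.shiftLeft_eq, Nat.one_mul]
  by_cases hk : k = j
  · subst hk
    rw [Nat.testBit_two_pow_self, pvGetD_lt (by simpa using hj), pvGetD_lt hj]
    simp [hj, (pvGetD_false h).2]
  · rw [pvGetDSet_ne hk, Nat.testBit_two_pow_of_ne (Ne.symm hk)]
    simp

theorem pvUnvisReplicate (n : Nat) : pvUnvis (List.replicate n false) = 2 ^ n - 1 := by
  induction n with
  | zero => simp [pvUnvis]
  | succ m ih =>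
    have h2 : 1 ≤ 2 ^ m := Nat.one_le_two_pow
    simp [List.replicate_succ, pvUnvis, ih, Nat.pow_succ]
    omega

def Wspec (nums : List Int) (mask : Nat) (i : Nat) : Int :=
  if h1 : ¬((mask >>> i) &&& 1 = 1) then 0
  else if mask = 1 <<< i then 1
  else
    (List.range nums.length).foldl (fun acc j =>
      if ((mask ^^^ (1 <<< i)) >>> j) &&& 1 = 1 ∧
         (PySem.Int.mod (nums.getD i 0) (nums.getD j 0) = 0 ∨
          PySem.Int.mod (nums.getD j 0) (nums.getD i 0) = 0)
      then PySem.Int.mod (acc + Wspec nums (mask ^^^ (1 <<< i)) j) 1000000007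
      else acc) 0
termination_by mask
decreasing_by exact pvXorPowLt ((pvBit1_iff _ _).1 (not_not.mp h1))

theorem pvMaskBit (v : List Bool) (i : Nat) :
    ((pvUnvis v ||| (1 <<< i)) >>> i) &&& 1 = 1 := by
  rw [pvBit1_iff, Nat.testBit_or, Nat.shiftLeft_eq, Nat.one_mul, Nat.testBit_two_pow_self]
  simp

theorem pvUnvisBitFalse {v : List Bool} {i : Nat} (hvi : v.getD i true = true) :
    (pvUnvis v).testBit i = false := by
  rw [pvUnvis_testBit, hvi]
  simp

theorem pvMaskXor {v : List Bool} {i : Nat} (hvi : v.getD i true = true) :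
    (pvUnvis v ||| (1 <<< i)) ^^^ (1 <<< i) = pvUnvis v := by
  apply Nat.eq_of_testBit_eq
  intro k
  rw [Nat.testBit_xor, Nat.testBit_or, Nat.shiftLeft_eq, Nat.one_mul]
  by_cases hk : k = i
  · subst hk
    simp [Nat.testBit_two_pow_self, pvUnvisBitFalse hvi]
  · simp [Nat.testBit_two_pow_of_ne (Ne.symm hk)]

theorem pvMaskEqPow {v : List Bool} {i : Nat} (hvi : v.getD i true = true) :
    (pvUnvis v ||| (1 <<< i)) = 1 <<< i ↔ pvUnvis v = 0 := by
  constructor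
  · intro h
    apply Nat.eq_of_testBit_eq
    intro k
    have := congrArg (fun m => m.testBit k) h
    simp only [Nat.testBit_or] at this
    by_cases hk : k = i
    · subst hk
      simp [pvUnvisBitFalse hvi]
    · rw [Nat.shiftLeft_eq, Nat.one_mul, Nat.testBit_two_pow_of_ne (Ne.symm hk)] at this
      simpa using this
  · intro h
    simp [h]

theorem pvFindEq (nums : List Int) :
    ∀ k (v : List Bool) (i : Nat), v.count false = k →
      v.length = nums.length → i < nums.length → v.getD i true = true →
      findcountA nums (i : Int) v ((v.count true : Nat) : Int)
        = Wspec nums (pvUnvis v ||| (1 <<< i)) i := by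
  intro k
  induction k using Nat.strong_induction_on with
  | _ k ih =>
    intro v i hk hlen hi hvi
    by_cases h0 : v.count false = 0
    · -- base: everything visited
      have hct : v.count true = nums.length := by
        have := pvCountTrueFalse v
        omega
      have hu : pvUnvis v = 0 := (pvUnvis_zero_iff v).2 h0
      rw [findcountA]
      rw [if_pos (by exact_mod_cast congrArg (Nat.cast : Nat → Int) hct)]
      rw [Wspec]
      rw [dif_neg (by simp [hu, pvMaskBit])]
      rw [if_pos (by simp [hu])]
    · -- recursive case
      have hct : ¬ ((v.count true : Int) = (nums.length : Int)) := by
        have := pvCountTrueFalse v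
        intro hh
        have : v.count true = nums.length := by exact_mod_cast hh
        omega
      rw [findcountA, if_neg hct, Wspec]
      rw [dif_neg (not_not_intro (pvMaskBit v i))]
      rw [if_neg (by rw [pvMaskEqPow hvi, pvUnvis_zero_iff]; exact h0)]
      simp only [pvMaskXor hvi]
      have loop : ∀ d j r, j + d = nums.length →
          fcLoop nums (i : Int) v ((v.count true : Nat) : Int) j r =
          (List.range' j d).foldl (fun acc j =>
            if ((pvUnvis v) >>> j) &&& 1 = 1 ∧
               (PySem.Int.mod (nums.getD i 0) (nums.getD j 0) = 0 ∨
                PySem.Int.mod (nums.getD j 0) (nums.getD i 0) = 0)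
            then PySem.Int.mod (acc + Wspec nums (pvUnvis v) j) 1000000007
            else acc) r := by
        intro d
        induction d with
        | zero =>
          intro j r hj
          rw [fcLoop, dif_neg (by omega)]
          simp
        | succ d ihd =>
          intro j r hj
          have hjn : j < nums.length := by omega
          rw [fcLoop, dif_pos hjn, List.range'_succ, List.foldl_cons]
          by_cases hv : v.getD j true = true
          · rw [dif_pos hv]
            rw [ihd (j + 1) r (by omega)]
            congr 1
            rw [if_neg]
            intro hc
            have := (pvBit1_iff _ _).1 hc.1
            rw [pvUnvis_testBit, hv] at this
            simp at this
          · have hvf : v.getD j true = false := by simpa using hv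
            rw [dif_neg hv]
            simp only [PySem.List.pyGetD_natCast]
            by_cases hcomp : PySem.Int.mod (nums.getD i 0) (nums.getD j 0) = 0 ∨
                PySem.Int.mod (nums.getD j 0) (nums.getD i 0) = 0
            · -- compatible: A recurses, spec adds
              rw [if_neg (by
                intro hc
                rcases hcomp with hc2 | hc2
                · exact hc.2.1 hc2
                · exact hc.2.2 hc2)]
              have hcnt : ((v.count true : Nat) : Int) + 1
                  = (((v.set j true).count true : Nat) : Int) := by
                rw [pvCountTrueSet hvf]
                push_cast
                ring
              have hrec : findcountA nums (j : Int) (v.set j true)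
                    (((v.set j true).count true : Nat) : Int)
                  = Wspec nums (pvUnvis v) j := by
                have hlt : (v.set j true).count false < k := by
                  rw [← hk]; exact pvCountFalseSet hvf
                have := ih _ hlt (v.set j true) j rfl (by simpa using hlen) hjn
                  (by rw [pvGetD_lt (by simp [(pvGetD_false hvf).1])]
                      simp [(pvGetD_false hvf).1])
                rw [this, pvUnvisSetOr hvf]
              rw [hcnt, ihd (j + 1) _ (by omega), hrec]
              congr 1
              rw [if_pos]
              constructor
              · rw [pvBit1_iff, pvUnvis_testBit, hvf]
                simp [(pvGetD_false hvf).1]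
              · exact hcomp
            · -- incompatible: A skips, spec keeps
              have hc1 : PySem.Int.mod (nums.getD i 0) (nums.getD j 0) ≠ 0 :=
                fun h => hcomp (Or.inl h)
              have hc2 : PySem.Int.mod (nums.getD j 0) (nums.getD i 0) ≠ 0 :=
                fun h => hcomp (Or.inr h)
              rw [if_pos ⟨by omega, hc1, hc2⟩]
              rw [ihd (j + 1) r (by omega)]
              congr 1
              rw [if_neg]
              intro hc
              exact hcomp hc.2
      rw [loop nums.length 0 0 (by omega)]
      rw [← List.range_eq_range']

def pvWrow (nums : List Int) (mask : Nat) : List Int :=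
  (List.range nums.length).map (Wspec nums mask)

theorem pvGetDMapRange {α : Type} (f : Nat → α) (n j : Nat) (d : α) (hj : j < n) :
    ((List.range n).map f).getD j d = f j := by
  rw [List.getD_eq_getElem?_getD]
  simp [List.getElem?_map, List.getElem?_range hj]

theorem pvAltEntryEq (nums : List Int) (dpPrev : List (List Int)) (mask : Nat)
    (hdp : ∀ r, r < mask → dpPrev.getD r [] = pvWrow nums r) (i : Nat) :
    altEntry nums dpPrev mask i = Wspec nums mask i := by
  rw [altEntry, Wspec]
  by_cases h1 : ((mask >>> i) &&& 1 = 1)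
  · rw [if_neg (not_not_intro h1), dif_neg (not_not_intro h1)]
    by_cases h2 : mask = 1 <<< i
    · rw [if_pos h2, if_pos h2]
    · rw [if_neg h2, if_neg h2]
      have hrest : mask ^^^ (1 <<< i) < mask := pvXorPowLt ((pvBit1_iff _ _).1 h1)
      apply PySem.List.foldl_congr_mem'
      intro j hj acc
      rw [hdp _ hrest]
      by_cases hc : ((mask ^^^ (1 <<< i)) >>> j) &&& 1 = 1 ∧
          (PySem.Int.mod (nums.getD i 0) (nums.getD j 0) = 0 ∨
           PySem.Int.mod (nums.getD j 0) (nums.getD i 0) = 0)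
      · rw [if_pos hc, if_pos hc, pvWrow,
          pvGetDMapRange (Wspec nums (mask ^^^ (1 <<< i))) nums.length j 0
            (List.mem_range.1 hj)]
      · rw [if_neg hc, if_neg hc]
  · rw [if_pos h1, dif_pos h1]

theorem pvDpInv (nums : List Int) : ∀ m : Nat,
    (List.range' 1 m).foldl
      (fun dp mask =>
        dp ++ [(List.range nums.length).foldl
          (fun row i => row ++ [altEntry nums dp mask i]) []])
      [List.replicate nums.length 0]
    = (List.range (m + 1)).map (pvWrow nums) := by
  intro m
  induction m with
  | zero =>
    simp [pvWrow]
    apply List.ext_getElem <;> simp [Wspec]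
  | succ d ihd =>
    rw [List.range'_concat, List.foldl_append, List.foldl_cons, List.foldl_nil, ihd]
    rw [PySem.List.foldl_append_singleton_eq_map, List.nil_append]
    have hdp : ∀ r, r < 1 + 1 * d → ((List.range (d + 1)).map (pvWrow nums)).getD r [] = pvWrow nums r := by
      intro r hr
      exact pvGetDMapRange (pvWrow nums) (d + 1) r [] (by omega)
    have : (List.range nums.length).map (altEntry nums ((List.range (d + 1)).map (pvWrow nums)) (1 + 1 * d))
        = pvWrow nums (1 + 1 * d) := by
      rw [pvWrow]
      apply List.map_congr_left
      intro j _
      exact pvAltEntryEq nums _ _ hdp j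
    rw [this]
    have h1d : 1 + 1 * d = d + 1 := by omega
    rw [h1d]
    have : List.range (d + 1 + 1) = List.range (d + 1) ++ [d + 1] := List.range_succ
    rw [this, List.map_append, List.map_singleton]

theorem pvPyGetDNegOne {α : Type} (l : List α) (d : α) (h : l ≠ []) :
    PySem.List.pyGetD l (-1) d = l.getD (l.length - 1) d := by
  have hl : 0 < l.length := List.length_pos_iff.2 h
  simp only [PySem.List.pyGetD, PySem.List.pyGet?, PySem.List.pyIdx?]
  split_ifs with h1 h2 <;> try omega
  have : (- (-1 : Int)).toNat = 1 := by omega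
  rw [this]
  simp [List.getD_eq_getElem?_getD]

theorem pvFoldlModAux (f : Nat → Int) : ∀ (l : List Nat) (r : Int),
    l.foldl (fun acc x => PySem.Int.mod (acc + f x) 1000000007) (PySem.Int.mod r 1000000007)
      = PySem.Int.mod (r + (l.map f).sum) 1000000007 := by
  intro l
  induction l with
  | nil => intro r; simp
  | cons a t ih =>
    intro r
    rw [List.foldl_cons]
    have hstep : PySem.Int.mod (PySem.Int.mod r 1000000007 + f a) 1000000007
        = PySem.Int.mod (r + f a) 1000000007 := by
      rw [PySem.Int.mod_eq_emod_of_pos (by norm_num), PySem.Int.mod_eq_emod_of_pos (by norm_num),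
        PySem.Int.mod_eq_emod_of_pos (by norm_num), Int.emod_add_emod]
    rw [hstep, ih (r + f a), List.map_cons, List.sum_cons]
    congr 1
    ring

theorem pvFoldlMod (f : Nat → Int) (l : List Nat) :
    l.foldl (fun acc x => PySem.Int.mod (acc + f x) 1000000007) 0
      = PySem.Int.mod ((l.map f).sum) 1000000007 := by
  cases l with
  | nil => simp [PySem.Int.mod]
  | cons a t =>
    rw [List.foldl_cons]
    have h0 : (0 : Int) + f a = f a := by ring
    have : PySem.Int.mod (0 + f a) 1000000007 = PySem.Int.mod (f a) 1000000007 := by rw [h0]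
    rw [this, pvFoldlModAux f t (f a), List.map_cons, List.sum_cons]

theorem pvReplGetDFalse {n j : Nat} (hj : j < n) :
    (List.replicate n false).getD j true = false := by
  simp [List.getD_eq_getElem?_getD, List.getElem?_replicate, hj]

theorem pvTopLoop (nums : List Int) :
    ∀ d j r, j + d = nums.length →
      fcLoop nums (-1) (List.replicate nums.length false) 0 j r
        = (List.range' j d).foldl
            (fun acc x => PySem.Int.mod (acc + Wspec nums (2 ^ nums.length - 1) x) 1000000007) r := by
  intro d
  induction d with
  | zero =>
    intro j r hj
    rw [fcLoop, dif_neg (by omega)]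
    simp
  | succ d ihd =>
    intro j r hj
    have hjn : j < nums.length := by omega
    have hvf : (List.replicate nums.length false).getD j true = false := pvReplGetDFalse hjn
    rw [fcLoop, dif_pos hjn, dif_neg (by rw [hvf]; simp), if_neg (by simp), List.range'_succ,
      List.foldl_cons]
    have hcnt : ((List.replicate nums.length false).set j true).count true = 1 := by
      rw [pvCountTrueSet hvf]
      simp [List.count_replicate]
    have hrec : findcountA nums (j : Int) ((List.replicate nums.length false).set j true) (0 + 1)
        = Wspec nums (2 ^ nums.length - 1) j := by
      have := pvFindEq nums (((List.replicate nums.length false).set j true).count false)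
        ((List.replicate nums.length false).set j true) j rfl (by simp) hjn
        (by rw [pvGetD_lt (by simpa using hjn)]; simp [hjn])
      rw [hcnt] at this
      rw [show ((0 : Int) + 1) = ((1 : Nat) : Int) by norm_num, this,
        pvUnvisSetOr hvf, pvUnvisReplicate]
    rw [hrec, ihd (j + 1) _ (by omega)]

theorem pvMain (nums : List Int) : specialPerm nums = specialPerm_alt nums := by
  by_cases hn : nums.length = 0
  · rw [specialPerm, findcountA, if_pos (by rw [hn]; norm_num)]
    simp [specialPerm_alt, hn]
  · rw [specialPerm, findcountA,
      if_neg (by intro hh; exact hn (by exact_mod_cast hh.symm))]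
    rw [pvTopLoop nums nums.length 0 0 (by omega), ← List.range_eq_range',
      pvFoldlMod (Wspec nums (2 ^ nums.length - 1)) (List.range nums.length)]
    simp only [specialPerm_alt, if_neg hn]
    rw [pvDpInv nums (2 ^ nums.length - 1)]
    have hpow : 2 ^ nums.length - 1 + 1 = 2 ^ nums.length := by
      have : 1 ≤ 2 ^ nums.length := Nat.one_le_two_pow
      omega
    rw [hpow]
    have hne : (List.range (2 ^ nums.length)).map (pvWrow nums) ≠ [] := by
      simp [List.map_eq_nil_iff, List.range_eq_nil]
    rw [pvPyGetDNegOne _ _ hne, List.length_map, List.length_range]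
    rw [pvGetDMapRange (pvWrow nums) (2 ^ nums.length) (2 ^ nums.length - 1) []
      (by have : 1 ≤ 2 ^ nums.length := Nat.one_le_two_pow; omega)]
    rfl

-- ===== VERDICT (by name: the statement is the Claim_ definition above) =====
theorem specialPerm_spec : Claim_equal_specialPerm := by
  intro nums _ _
  exact pvMain nums
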